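-- pv_equiv track=rewrite | github.com/hosung-222/Coding-Test | 백준/Gold/13549. 숨바꼭질 3/숨바꼭질 3.py | bfs
-- ===== SOURCE A (Python) =====
-- from collections import deque
--
-- def bfs(n, k):
--     max_limit = 100001
--     dist = [-1] * max_limit
--     dist[n] = 0
--     q = deque()
--     q.append(n)
--
--     while q:
--         x = q.popleft()
--         if x == k:
--             return dist[k]
--
--         if x * 2 < max_limit and dist[x*2] == -1:
--             dist[x*2] = dist[x]
--             q.appendleft(x*2)
--
--         if x -1 >=0 and dist[x-1] == -1:
--             dist[x-1] = dist[x] + 1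
--             q.append(x-1)
--
--         if x + 1 < max_limit and dist[x+1] == -1:
--             dist[x+1] = dist[x] + 1
--             q.append(x+1)
--
--     return -1
-- ===== SOURCE B (Python) =====
-- def walk(x, k, seen, nxt):
--     # process x and, recursively, its zero-cost doubling chain; returns True iff k reached
--     if x == k:
--         return True
--     t = 2 * x
--     hop = t < 100001 and not seen[t]
--     if hop:
--         seen[t] = True
--     if x - 1 >= 0 and not seen[x - 1]:
--         seen[x - 1] = True
--         nxt.append(x - 1)
--     if x + 1 < 100001 and not seen[x + 1]:
--         seen[x + 1] = True
--         nxt.append(x + 1)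
--     return hop and walk(t, k, seen, nxt)
--
--
-- def bfs(n, k):
--     # level-synchronous BFS: a visited bitmap and a level counter replace the
--     # distance array; the deque is replaced by per-level frontier lists with
--     # recursive expansion of the zero-cost doubling chains.
--     seen = [False] * 100001
--     seen[n] = True
--     cur = [n]
--     d = 0
--     while cur:
--         nxt = []
--         for x in cur:
--             if walk(x, k, seen, nxt):
--                 return d
--         cur = nxt
--         d += 1
--     return -1
-- ===== Notes on version B (the rewrite author's own statement) =====
-- stated objective: alternative
-- what changed: Replaces the deque-based 0-1 BFS over a distance array by a level-synchronous BFS: a visited bitmap plus per-level frontier lists with recursive expansion of the zero-cost doubling chains, returning a level counter instead of a stored distance; the deque, appendleft and the distance array all disappear.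
-- outside the precondition, e.g. on bfs(-1, -2): A returns 0, B returns 0; on bfs(-3, 5): A raises IndexError, B raises IndexError
import Mathlib
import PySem

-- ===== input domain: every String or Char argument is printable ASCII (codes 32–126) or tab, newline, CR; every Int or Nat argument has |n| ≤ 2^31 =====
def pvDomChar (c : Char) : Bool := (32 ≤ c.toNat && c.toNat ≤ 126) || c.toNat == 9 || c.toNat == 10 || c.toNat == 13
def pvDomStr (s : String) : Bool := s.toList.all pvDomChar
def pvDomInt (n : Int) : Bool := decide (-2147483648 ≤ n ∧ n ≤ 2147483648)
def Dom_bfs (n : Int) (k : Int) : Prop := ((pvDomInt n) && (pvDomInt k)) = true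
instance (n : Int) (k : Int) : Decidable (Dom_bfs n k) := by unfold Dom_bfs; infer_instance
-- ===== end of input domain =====

-- B replaces A's deque-based 0-1 BFS over a distance array by a level-synchronous BFS over a
-- visited BITMAP with RECURSIVE expansion of the zero-cost doubling chains and a level counter:
-- no deque, no distance array, the answer is the loop counter (objective: alternative).

-- ===== PORT A =====
-- python list read/write dist[i]; exact for 0 ≤ i < a.size (the only accesses made inside Pre_bfs)
def pyAt (a : Array Int) (i : Int) : Int := a.getD i.toNat 0
def pySet (a : Array Int) (i : Int) (v : Int) : Array Int := a.set! i.toNat v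

-- one body of A's while loop, after popping x; the deque is f ++ b.reverse (b newest-first), so
-- q.appendleft is a cons on f and q.append a cons on b; each python `if` guards two assignments,
-- transcribed as two lets sharing the (pure) condition
def bfsStep (k : Int) (dist : Array Int) (x : Int) (f b : List Int) :
    Int ⊕ (Array Int × List Int × List Int) :=
  if x = k then Sum.inl (pyAt dist k)
  else
    let c2 := x * 2 < 100001 ∧ pyAt dist (x * 2) = -1
    let dist1 := if c2 then pySet dist (x * 2) (pyAt dist x) else dist
    let f1 := if c2 then x * 2 :: f else f
    let cl := x - 1 ≥ 0 ∧ pyAt dist1 (x - 1) = -1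
    let dist2 := if cl then pySet dist1 (x - 1) (pyAt dist1 x + 1) else dist1
    let b1 := if cl then (x - 1) :: b else b
    let cr := x + 1 < 100001 ∧ pyAt dist2 (x + 1) = -1
    let dist3 := if cr then pySet dist2 (x + 1) (pyAt dist2 x + 1) else dist2
    let b2 := if cr then (x + 1) :: b1 else b1
    Sum.inr (dist3, f1, b2)

-- A's while loop; the fuel only makes the recursion structural (pops are bounded by 100002, far
-- below the initial fuel, so the 0 branch is never reached on inputs admitted by Pre_bfs)
def bfsAux (k : Int) : Nat → Array Int → List Int → List Int → Int
  | 0, _, _, _ => -1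
  | fuel + 1, dist, f, b =>
    match f with
    | x :: f' =>
      match bfsStep k dist x f' b with
      | Sum.inl r => r
      | Sum.inr (dist', f'', b') => bfsAux k fuel dist' f'' b'
    | [] =>
      match b.reverse with
      | [] => -1
      | x :: f' =>
        match bfsStep k dist x f' [] with
        | Sum.inl r => r
        | Sum.inr (dist', f'', b') => bfsAux k fuel dist' f'' b'

def bfs (n : Int) (k : Int) : Int :=
  bfsAux k 1000000 (pySet (Array.replicate 100001 (-1)) n 0) [n] []

-- ===== PORT B =====
-- python bool-list read/write seen[i]; exact for 0 ≤ i < a.size (the only accesses under Pre_bfs)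
def pyAtB (a : Array Bool) (i : Int) : Bool := a.getD i.toNat false
def pySetB (a : Array Bool) (i : Int) : Array Bool := a.set! i.toNat true

-- result of Source B's `walk`: besides True/False it leaves the mutated `seen` and `nxt` behind,
-- and the fuel (one unit per processed node, mirroring one deque pop of A) makes the chain
-- recursion structural; `timeout` is the exhausted-fuel escape (never reached under Pre_bfs)
inductive WalkRes where
  | timeout : WalkRes
  | found : WalkRes
  | cont : Nat → Array Bool → Array Int → WalkRes

-- Source B's `walk`: recursive processing of x and its zero-cost doubling chain
def walkB (k : Int) : Nat → Array Bool → Int → Array Int → WalkRes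
  | 0, _, _, _ => .timeout
  | fuel + 1, seen, x, nxt =>
    if x = k then .found
    else
      let t := 2 * x
      let hop := t < 100001 ∧ pyAtB seen t = false
      let seen1 := if hop then pySetB seen t else seen
      let c1 := x - 1 ≥ 0 ∧ pyAtB seen1 (x - 1) = false
      let seen2 := if c1 then pySetB seen1 (x - 1) else seen1
      let nxt1 := if c1 then nxt.push (x - 1) else nxt
      let c2 := x + 1 < 100001 ∧ pyAtB seen2 (x + 1) = false
      let seen3 := if c2 then pySetB seen2 (x + 1) else seen2
      let nxt2 := if c2 then nxt1.push (x + 1) else nxt1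
      if hop then walkB k fuel seen3 t nxt2 else .cont fuel seen3 nxt2

-- Source B's outer while loop over the current level `cur`, collecting the next level `nxt`;
-- d is the level counter.  `gas` only makes the recursion structural: it bounds the number of
-- loop steps (pops plus level switches), while the walkB fuel keeps counting pops exactly as
-- A's bfsAux fuel does; both are too large to run out on inputs admitted by Pre_bfs
def bLoop (k : Int) : Nat → Nat → Array Bool → List Int → Array Int → Int → Int
  | 0, _, _, _, _, _ => -1
  | gas + 1, fuel, seen, cur, nxt, d =>
    match cur with
    | x :: cur' =>
      match walkB k fuel seen x nxt with
      | .timeout => -1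
      | .found => d
      | .cont fuel' seen' nxt' => bLoop k gas fuel' seen' cur' nxt' d
    | [] =>
      match nxt.toList with
      | [] => -1
      | y :: nxt0 => bLoop k gas fuel seen (y :: nxt0) #[] (d + 1)

def bfs_alt (n : Int) (k : Int) : Int :=
  bLoop k 2000002 1000000 (pySetB (Array.replicate 100001 false) n) [n] #[] 0

-- ===== PRECONDITION & SPEC =====
-- Pre_ excludes n outside [0, 100000]: there dist[n] (or, for negative n after index wraparound,
-- a dist access on the doubling chain) raises IndexError for almost all k; on the rare wrapped
-- negative inputs where A does return, B's recursion happens to return the same value, but that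
-- wraparound behaviour is accidental and is excluded.
def Pre_bfs (n : Int) (k : Int) : Prop := 0 ≤ n ∧ n ≤ 100000
instance (n : Int) (k : Int) : Decidable (Pre_bfs n k) := by unfold Pre_bfs; infer_instance
def pvWitness_bfs : Int × Int := (3, 17)
def Spec_bfs (n : Int) (k : Int) (out : Int) : Prop := out = bfs_alt n k
instance (n : Int) (k : Int) (out : Int) : Decidable (Spec_bfs n k out) := by unfold Spec_bfs; infer_instance

-- ===== CLAIM (what is proved, stated in full; the proofs are below) =====
def Claim_equal_bfs : Prop := ∀ (n : Int) (k : Int), Dom_bfs n k → Pre_bfs n k → Spec_bfs n k (bfs n k)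

-- ===== LEMMAS AND PROOFS =====

-- the invariant tying A's distance array to B's visited bitmap and level lists:
-- a cell is -1 exactly when the bitmap flag is still false …
def RMem (dist : Array Int) (seen : Array Bool) : Prop :=
  ∀ v : Int, 0 ≤ v → v < 100001 → (pyAt dist v = -1 ↔ pyAtB seen v = false)
-- … and every member of a level list is in range with its cell holding the level number
def RLev (dist : Array Int) (l : List Int) (d : Int) : Prop :=
  ∀ c ∈ l, 0 ≤ c ∧ c < 100001 ∧ pyAt dist c = d

theorem size_pySet (a : Array Int) (i : Int) (v : Int) : (pySet a i v).size = a.size := by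
  simp [pySet]

theorem size_pySetB (a : Array Bool) (i : Int) : (pySetB a i).size = a.size := by
  simp [pySetB]

theorem pyAt_pySet (a : Array Int) (i j v : Int) (hsz : a.size = 100001)
    (hi0 : 0 ≤ i) (hi1 : i < 100001) (hj0 : 0 ≤ j) (hj1 : j < 100001) :
    pyAt (pySet a i v) j = if j = i then v else pyAt a j := by
  have hi : i.toNat < a.size := by omega
  have hj : j.toNat < a.size := by omega
  simp only [pyAt, pySet, Array.set!]
  by_cases h : j = i
  · subst h
    simp [Array.getD, hj, Array.getElem_setIfInBounds_self]
  · have hne : i.toNat ≠ j.toNat := by omega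
    simp [Array.getD, hj, Array.size_setIfInBounds, hne, h]

theorem pyAtB_pySetB (a : Array Bool) (i j : Int) (hsz : a.size = 100001)
    (hi0 : 0 ≤ i) (hi1 : i < 100001) (hj0 : 0 ≤ j) (hj1 : j < 100001) :
    pyAtB (pySetB a i) j = if j = i then true else pyAtB a j := by
  have hi : i.toNat < a.size := by omega
  have hj : j.toNat < a.size := by omega
  simp only [pyAtB, pySetB, Array.set!]
  by_cases h : j = i
  · subst h
    simp [Array.getD, hj, Array.getElem_setIfInBounds_self]
  · have hne : i.toNat ≠ j.toNat := by omega
    simp [Array.getD, hj, Array.size_setIfInBounds, hne, h]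

theorem RMem_write (dist : Array Int) (seen : Array Bool) (t v : Int)
    (hsz : dist.size = 100001) (hszB : seen.size = 100001)
    (ht0 : 0 ≤ t) (ht1 : t < 100001) (hv : v ≠ -1)
    (h : RMem dist seen) : RMem (pySet dist t v) (pySetB seen t) := by
  intro u hu0 hu1
  rw [pyAt_pySet dist t u v hsz ht0 ht1 hu0 hu1,
    pyAtB_pySetB seen t u hszB ht0 ht1 hu0 hu1]
  by_cases he : u = t
  · simp [he, hv]
  · simp only [if_neg he]
    exact h u hu0 hu1

theorem RLev_write (dist : Array Int) (l : List Int) (d t v : Int)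
    (hsz : dist.size = 100001) (ht0 : 0 ≤ t) (ht1 : t < 100001)
    (htv : pyAt dist t = -1) (hd : d ≠ -1)
    (h : RLev dist l d) : RLev (pySet dist t v) l d := by
  intro c hc
  obtain ⟨h0, h1, h2⟩ := h c hc
  refine ⟨h0, h1, ?_⟩
  rw [pyAt_pySet dist t c v hsz ht0 ht1 h0 h1]
  have : c ≠ t := by intro he; rw [he, htv] at h2; exact hd h2.symm
  simp [this, h2]

theorem pyAt_pySet_ne (a : Array Int) (i j v : Int) (hsz : a.size = 100001)
    (hi0 : 0 ≤ i) (hi1 : i < 100001) (hj0 : 0 ≤ j) (hj1 : j < 100001) (hne : j ≠ i) :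
    pyAt (pySet a i v) j = pyAt a j := by
  rw [pyAt_pySet a i j v hsz hi0 hi1 hj0 hj1, if_neg hne]

theorem bfsAux_nil (k : Int) (fuel : Nat) (dist : Array Int) :
    bfsAux k fuel dist [] [] = -1 := by
  cases fuel <;> simp [bfsAux]

theorem bfsAux_rotate (k : Int) (fuel : Nat) (dist : Array Int) (b : List Int) :
    bfsAux k fuel dist [] b = bfsAux k fuel dist b.reverse [] := by
  cases fuel with
  | zero => rfl
  | succ fuel =>
    cases hb : b.reverse with
    | nil => simp [bfsAux, hb]
    | cons x f' => simp [bfsAux, hb]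

-- B's one-step updates of the visited bitmap and the next-level array (the let-bodies of walkB)
abbrev hopC (seen : Array Bool) (x : Int) : Prop := 2 * x < 100001 ∧ pyAtB seen (2 * x) = false
def seen1U (seen : Array Bool) (x : Int) : Array Bool :=
  if hopC seen x then pySetB seen (2 * x) else seen
def seen2U (seen : Array Bool) (x : Int) : Array Bool :=
  if x - 1 ≥ 0 ∧ pyAtB (seen1U seen x) (x - 1) = false then pySetB (seen1U seen x) (x - 1)
  else seen1U seen x
def seen3U (seen : Array Bool) (x : Int) : Array Bool :=
  if x + 1 < 100001 ∧ pyAtB (seen2U seen x) (x + 1) = false then pySetB (seen2U seen x) (x + 1)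
  else seen2U seen x
def nxt1U (seen : Array Bool) (nxt : Array Int) (x : Int) : Array Int :=
  if x - 1 ≥ 0 ∧ pyAtB (seen1U seen x) (x - 1) = false then nxt.push (x - 1) else nxt
def nxt2U (seen : Array Bool) (nxt : Array Int) (x : Int) : Array Int :=
  if x + 1 < 100001 ∧ pyAtB (seen2U seen x) (x + 1) = false then (nxt1U seen nxt x).push (x + 1)
  else nxt1U seen nxt x

theorem walkB_unfold (k : Int) (fuel : Nat) (seen : Array Bool) (x : Int)
    (nxt : Array Int) :
    walkB k (fuel + 1) seen x nxt =
      if x = k then .found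
      else if hopC seen x then walkB k fuel (seen3U seen x) (2 * x) (nxt2U seen nxt x)
      else .cont fuel (seen3U seen x) (nxt2U seen nxt x) := by
  show (if x = k then WalkRes.found
      else
        let t := 2 * x
        let hop := t < 100001 ∧ pyAtB seen t = false
        let seen1 := if hop then pySetB seen t else seen
        let c1 := x - 1 ≥ 0 ∧ pyAtB seen1 (x - 1) = false
        let seen2 := if c1 then pySetB seen1 (x - 1) else seen1
        let nxt1 := if c1 then nxt.push (x - 1) else nxt
        let c2 := x + 1 < 100001 ∧ pyAtB seen2 (x + 1) = false
        let seen3 := if c2 then pySetB seen2 (x + 1) else seen2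
        let nxt2 := if c2 then nxt1.push (x + 1) else nxt1
        if hop then walkB k fuel seen3 t nxt2 else .cont fuel seen3 nxt2) = _
  simp only [hopC, seen3U, seen2U, seen1U, nxt2U, nxt1U]
  rfl

-- a cont result consumes fuel (used for the gas arithmetic in loop_sim)
theorem walkB_cont_lt (k : Int) : ∀ (fuel : Nat) (seen : Array Bool) (x : Int)
    (nxt : Array Int) (fuel' : Nat) (seen' : Array Bool) (nxt' : Array Int),
    walkB k fuel seen x nxt = .cont fuel' seen' nxt' → fuel' < fuel := by
  intro fuel
  induction fuel with
  | zero => intro _ _ _ _ _ _ h; simp [walkB] at h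
  | succ fuel ih =>
    intro seen x nxt fuel' seen' nxt' h
    simp only [walkB] at h
    by_cases h1 : x = k
    · rw [if_pos h1] at h; cases h
    · rw [if_neg h1] at h
      by_cases h2 : (2 * x < 100001 ∧ pyAtB seen (2 * x) = false)
      · rw [if_pos h2] at h
        exact Nat.lt_succ_of_lt (ih _ _ _ _ _ _ h)
      · rw [if_neg h2] at h
        cases h
        exact Nat.lt_succ_self fuel

-- the common tail of one step: the two unit-cost writes (x-1 then x+1), on both sides
theorem stepTail_sim (dist1 : Array Int) (seen1 : Array Bool) (x : Int)
    (b : List Int) (nxt : Array Int) (d : Int)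
    (hsz : dist1.size = 100001) (hszB : seen1.size = 100001) (hd : 0 ≤ d)
    (hmem : RMem dist1 seen1)
    (hx0 : 0 ≤ x) (hx1 : x < 100001) (hx : pyAt dist1 x = d)
    (hn : RLev dist1 nxt.toList (d + 1)) (hb : b.reverse = nxt.toList) :
    let s2 := if x - 1 ≥ 0 ∧ pyAtB seen1 (x - 1) = false then pySetB seen1 (x - 1) else seen1
    let s3 := if x + 1 < 100001 ∧ pyAtB s2 (x + 1) = false then pySetB s2 (x + 1) else s2
    let l1 := if x - 1 ≥ 0 ∧ pyAtB seen1 (x - 1) = false then nxt.push (x - 1) else nxt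
    let l2 := if x + 1 < 100001 ∧ pyAtB s2 (x + 1) = false then l1.push (x + 1) else l1
    let cl := x - 1 ≥ 0 ∧ pyAt dist1 (x - 1) = -1
    let dist2 := if cl then pySet dist1 (x - 1) (pyAt dist1 x + 1) else dist1
    let b1 := if cl then (x - 1) :: b else b
    let cr := x + 1 < 100001 ∧ pyAt dist2 (x + 1) = -1
    let dist3 := if cr then pySet dist2 (x + 1) (pyAt dist2 x + 1) else dist2
    let b2 := if cr then (x + 1) :: b1 else b1
    dist3.size = 100001 ∧ s3.size = 100001 ∧ RMem dist3 s3 ∧ b2.reverse = l2.toList ∧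
    RLev dist3 l2.toList (d + 1) ∧
    (∀ u : Int, 0 ≤ u → u < 100001 → pyAt dist1 u = d → pyAt dist3 u = d) ∧
    (∀ l : List Int, ∀ e : Int, e ≠ -1 → RLev dist1 l e → RLev dist3 l e) := by
  intro s2 s3 l1 l2 cl dist2 b1 cr dist3 b2
  have hiff2 : cl ↔ (x - 1 ≥ 0 ∧ pyAtB seen1 (x - 1) = false) := by
    unfold RMem at hmem
    constructor
    · rintro ⟨ha, hv⟩; exact ⟨ha, (hmem _ (by omega) (by omega)).mp hv⟩
    · rintro ⟨ha, hv⟩; exact ⟨ha, (hmem _ (by omega) (by omega)).mpr hv⟩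
  -- facts after the first write
  have H2 : dist2.size = 100001 ∧ s2.size = 100001 ∧ RMem dist2 s2 ∧ pyAt dist2 x = d ∧
      RLev dist2 nxt.toList (d + 1) ∧
      (∀ u : Int, 0 ≤ u → u < 100001 → pyAt dist1 u = d → pyAt dist2 u = d) := by
    by_cases h : cl
    · have hB : x - 1 ≥ 0 ∧ pyAtB seen1 (x - 1) = false := hiff2.mp h
      have e2 : dist2 = pySet dist1 (x - 1) (d + 1) := by
        show (if cl then _ else _) = _; rw [if_pos h, hx]
      have es : s2 = pySetB seen1 (x - 1) := by
        show (if _ then _ else _) = _; rw [if_pos hB]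
      refine ⟨by rw [e2, size_pySet, hsz], by rw [es, size_pySetB, hszB], ?_, ?_, ?_, ?_⟩
      · rw [e2, es]
        exact RMem_write dist1 seen1 (x - 1) (d + 1) hsz hszB (by omega) (by omega)
          (by omega) hmem
      · rw [e2, pyAt_pySet_ne dist1 (x - 1) x (d + 1) hsz (by omega) (by omega) hx0 hx1
          (by omega)]
        exact hx
      · rw [e2]
        exact RLev_write dist1 nxt.toList (d + 1) (x - 1) (d + 1) hsz (by omega) (by omega)
          h.2 (by omega) hn
      · intro u hu0 hu1 hud
        rw [e2, pyAt_pySet dist1 (x - 1) u (d + 1) hsz (by omega) (by omega) hu0 hu1]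
        have : u ≠ x - 1 := by intro he; rw [he] at hud; rw [h.2] at hud; omega
        rw [if_neg this]; exact hud
    · have hB : ¬(x - 1 ≥ 0 ∧ pyAtB seen1 (x - 1) = false) := fun hc => h (hiff2.mpr hc)
      have e2 : dist2 = dist1 := by show (if cl then _ else _) = _; rw [if_neg h]
      have es : s2 = seen1 := by show (if _ then _ else _) = _; rw [if_neg hB]
      exact ⟨by rw [e2, hsz], by rw [es, hszB], by rw [e2, es]; exact hmem,
        by rw [e2]; exact hx, by rw [e2]; exact hn, fun u _ _ hud => by rw [e2]; exact hud⟩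
  obtain ⟨hsz2, hszB2, hmem2, hx2, hn2, hkeep2⟩ := H2
  -- the next-level array after the first write
  have hl1 : RLev dist2 l1.toList (d + 1) := by
    by_cases h : cl
    · have hB := hiff2.mp h
      have el : l1 = nxt.push (x - 1) := by show (if _ then _ else _) = _; rw [if_pos hB]
      rw [el]
      intro c hc
      rw [Array.toList_push] at hc
      rcases List.mem_append.mp hc with hc | hc
      · exact hn2 c hc
      · rcases List.mem_singleton.mp hc with rfl
        refine ⟨by omega, by omega, ?_⟩
        have e2 : dist2 = pySet dist1 (x - 1) (d + 1) := by
          show (if cl then _ else _) = _; rw [if_pos h, hx]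
        rw [e2, pyAt_pySet dist1 (x - 1) (x - 1) (d + 1) hsz (by omega) (by omega)
          (by omega) (by omega), if_pos rfl]
    · have hB : ¬(x - 1 ≥ 0 ∧ pyAtB seen1 (x - 1) = false) := fun hc => h (hiff2.mpr hc)
      have el : l1 = nxt := by show (if _ then _ else _) = _; rw [if_neg hB]
      rw [el]; exact hn2
  have hb1 : b1.reverse = l1.toList := by
    by_cases h : cl
    · have hB := hiff2.mp h
      show (if cl then _ else _ : List Int).reverse = _
      rw [if_pos h]
      show ((x - 1) :: b).reverse = l1.toList
      have el : l1 = nxt.push (x - 1) := by show (if _ then _ else _) = _; rw [if_pos hB]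
      rw [el, Array.toList_push, ← hb]; simp
    · have hB : ¬(x - 1 ≥ 0 ∧ pyAtB seen1 (x - 1) = false) := fun hc => h (hiff2.mpr hc)
      show (if cl then _ else _ : List Int).reverse = _
      rw [if_neg h]
      have el : l1 = nxt := by show (if _ then _ else _) = _; rw [if_neg hB]
      rw [el, hb]
  -- the second write
  have hiff3 : cr ↔ (x + 1 < 100001 ∧ pyAtB s2 (x + 1) = false) := by
    unfold RMem at hmem2
    constructor
    · rintro ⟨ha, hv⟩; exact ⟨ha, (hmem2 _ (by omega) (by omega)).mp hv⟩
    · rintro ⟨ha, hv⟩; exact ⟨ha, (hmem2 _ (by omega) (by omega)).mpr hv⟩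
  by_cases h : cr
  · have hB : x + 1 < 100001 ∧ pyAtB s2 (x + 1) = false := hiff3.mp h
    have e3 : dist3 = pySet dist2 (x + 1) (d + 1) := by
      show (if cr then _ else _) = _; rw [if_pos h, hx2]
    have es : s3 = pySetB s2 (x + 1) := by
      show (if _ then _ else _) = _; rw [if_pos hB]
    have el : l2 = l1.push (x + 1) := by show (if _ then _ else _) = _; rw [if_pos hB]
    have eb : b2 = (x + 1) :: b1 := by show (if cr then _ else _) = _; rw [if_pos h]
    refine ⟨by rw [e3, size_pySet, hsz2], by rw [es, size_pySetB, hszB2], ?_, ?_, ?_, ?_, ?_⟩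
    · rw [e3, es]
      exact RMem_write dist2 s2 (x + 1) (d + 1) hsz2 hszB2 (by omega) (by omega)
        (by omega) hmem2
    · rw [eb, el, Array.toList_push, ← hb1]; simp
    · rw [e3, el]
      intro c hc
      rw [Array.toList_push] at hc
      rcases List.mem_append.mp hc with hc | hc
      · obtain ⟨hc0, hc1, hc2⟩ := hl1 c hc
        refine ⟨hc0, hc1, ?_⟩
        rw [pyAt_pySet dist2 (x + 1) c (d + 1) hsz2 (by omega) (by omega) hc0 hc1]
        have : c ≠ x + 1 := by intro he; rw [he] at hc2; rw [h.2] at hc2; omega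
        rw [if_neg this]; exact hc2
      · rcases List.mem_singleton.mp hc with rfl
        refine ⟨by omega, by omega, ?_⟩
        rw [pyAt_pySet dist2 (x + 1) (x + 1) (d + 1) hsz2 (by omega) (by omega)
          (by omega) (by omega), if_pos rfl]
    · intro u hu0 hu1 hud
      have hud2 := hkeep2 u hu0 hu1 hud
      rw [e3, pyAt_pySet dist2 (x + 1) u (d + 1) hsz2 (by omega) (by omega) hu0 hu1]
      have : u ≠ x + 1 := by intro he; rw [he] at hud2; rw [h.2] at hud2; omega
      rw [if_neg this]; exact hud2
    · intro l e he hle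
      have step1 : RLev dist2 l e := by
        by_cases hc : cl
        · have e2 : dist2 = pySet dist1 (x - 1) (d + 1) := by
            show (if cl then _ else _) = _; rw [if_pos hc, hx]
          rw [e2]
          exact RLev_write dist1 l e (x - 1) (d + 1) hsz (by omega) (by omega) hc.2 he hle
        · have e2 : dist2 = dist1 := by show (if cl then _ else _) = _; rw [if_neg hc]
          rw [e2]; exact hle
      rw [e3]
      exact RLev_write dist2 l e (x + 1) (d + 1) hsz2 (by omega) (by omega) h.2 he step1
  · have hB : ¬(x + 1 < 100001 ∧ pyAtB s2 (x + 1) = false) := fun hc => h (hiff3.mpr hc)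
    have e3 : dist3 = dist2 := by show (if cr then _ else _) = _; rw [if_neg h]
    have es : s3 = s2 := by show (if _ then _ else _) = _; rw [if_neg hB]
    have el : l2 = l1 := by show (if _ then _ else _) = _; rw [if_neg hB]
    have eb : b2 = b1 := by show (if cr then _ else _) = _; rw [if_neg h]
    refine ⟨by rw [e3, hsz2], by rw [es, hszB2], by rw [e3, es]; exact hmem2,
      by rw [eb, el]; exact hb1, by rw [e3, el]; exact hl1,
      fun u hu0 hu1 hud => by rw [e3]; exact hkeep2 u hu0 hu1 hud, ?_⟩
    intro l e he hle
    rw [e3]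
    by_cases hc : cl
    · have e2 : dist2 = pySet dist1 (x - 1) (d + 1) := by
        show (if cl then _ else _) = _; rw [if_pos hc, hx]
      rw [e2]
      exact RLev_write dist1 l e (x - 1) (d + 1) hsz (by omega) (by omega) hc.2 he hle
    · have e2 : dist2 = dist1 := by show (if cl then _ else _) = _; rw [if_neg hc]
      rw [e2]; exact hle

-- one pop of A (bfsStep) corresponds to one walk step of B, invariants carried along
theorem step_sim (k : Int) (dist : Array Int) (seen : Array Bool) (x : Int)
    (f b : List Int) (nxt : Array Int) (d : Int)
    (hsz : dist.size = 100001) (hszB : seen.size = 100001) (hd : 0 ≤ d)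
    (hmem : RMem dist seen)
    (hx0 : 0 ≤ x) (hx1 : x < 100001) (hx : pyAt dist x = d)
    (hf : RLev dist f d) (hn : RLev dist nxt.toList (d + 1)) (hb : b.reverse = nxt.toList)
    (hxk : x ≠ k) :
    ∃ dist3 b2,
      dist3.size = 100001 ∧ (seen3U seen x).size = 100001 ∧ RMem dist3 (seen3U seen x) ∧
      RLev dist3 f d ∧ RLev dist3 (nxt2U seen nxt x).toList (d + 1) ∧
      b2.reverse = (nxt2U seen nxt x).toList ∧
      (hopC seen x → 0 ≤ 2 * x ∧ 2 * x < 100001 ∧ pyAt dist3 (2 * x) = d) ∧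
      bfsStep k dist x f b =
        Sum.inr (dist3, (if hopC seen x then 2 * x :: f else f), b2) := by
  have hmul : x * 2 = 2 * x := by ring
  by_cases hP1 : hopC seen x
  · obtain ⟨hlt, hnm⟩ := hP1
    have hP1' : hopC seen x := ⟨hlt, hnm⟩
    have hA2 : pyAt dist (x * 2) = -1 := by
      rw [hmul]; exact (hmem _ (by omega) hlt).mpr hnm
    have hA1 : x * 2 < 100001 ∧ pyAt dist (x * 2) = -1 := ⟨by omega, hA2⟩
    have hszd : (pySet dist (2 * x) d).size = 100001 := by rw [size_pySet, hsz]
    have hszB1 : (seen1U seen x).size = 100001 := by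
      rw [seen1U, if_pos hP1', size_pySetB, hszB]
    have hmem1 : RMem (pySet dist (2 * x) d) (seen1U seen x) := by
      rw [seen1U, if_pos hP1']
      exact RMem_write dist seen (2 * x) d hsz hszB (by omega) hlt (by omega) hmem
    have hA2' : pyAt dist (2 * x) = -1 := by rw [← hmul]; exact hA2
    have hxne : x ≠ 2 * x := by
      intro he
      have : x = 0 := by omega
      rw [this] at hx; rw [this] at hA2'
      simp at hA2'; rw [hA2'] at hx; omega
    have hx1' : pyAt (pySet dist (2 * x) d) x = d := by
      rw [pyAt_pySet_ne dist (2 * x) x d hsz (by omega) hlt hx0 hx1 hxne]; exact hx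
    have hf1 : RLev (pySet dist (2 * x) d) f d :=
      RLev_write dist f d (2 * x) d hsz (by omega) hlt hA2' (by omega) hf
    have hn1 : RLev (pySet dist (2 * x) d) nxt.toList (d + 1) :=
      RLev_write dist nxt.toList (d + 1) (2 * x) d hsz (by omega) hlt hA2' (by omega) hn
    have T := stepTail_sim (pySet dist (2 * x) d) (seen1U seen x) x b nxt d hszd hszB1 hd
      hmem1 hx0 hx1 hx1' hn1 hb
    obtain ⟨hsz3, hszB3, hmem3, hb3, hl3, hkeep3, hlev3⟩ := T
    refine ⟨_, _, hsz3, ?_, ?_, ?_, ?_, hb3, ?_, ?_⟩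
    · exact hszB3
    · exact hmem3
    · exact hlev3 f d (by omega) hf1
    · exact hl3
    · intro _
      refine ⟨by omega, hlt, ?_⟩
      apply hkeep3 (2 * x) (by omega) hlt
      rw [pyAt_pySet dist (2 * x) (2 * x) d hsz (by omega) hlt (by omega) hlt, if_pos rfl]
    · simp only [bfsStep]
      rw [if_neg hxk]
      have h1T : (x * 2 < 100001 ∧ pyAt dist (x * 2) = -1) = True := eq_true hA1
      simp only [h1T, if_true]
      rw [if_pos hP1', hmul, hx]
  · have hA1 : ¬(x * 2 < 100001 ∧ pyAt dist (x * 2) = -1) := by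
      intro ⟨ha, hb2⟩
      exact hP1 ⟨by omega, (hmem _ (by omega) (by omega)).mp (by rw [← hmul]; exact hb2)⟩
    have hszB1 : (seen1U seen x).size = 100001 := by rw [seen1U, if_neg hP1]; exact hszB
    have hmem1 : RMem dist (seen1U seen x) := by rw [seen1U, if_neg hP1]; exact hmem
    have T := stepTail_sim dist (seen1U seen x) x b nxt d hsz hszB1 hd hmem1 hx0 hx1 hx hn hb
    obtain ⟨hsz3, hszB3, hmem3, hb3, hl3, hkeep3, hlev3⟩ := T
    refine ⟨_, _, hsz3, ?_, ?_, ?_, ?_, hb3, ?_, ?_⟩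
    · exact hszB3
    · exact hmem3
    · exact hlev3 f d (by omega) hf
    · exact hl3
    · intro hc; exact absurd hc hP1
    · simp only [bfsStep]
      rw [if_neg hxk]
      have h1T : (x * 2 < 100001 ∧ pyAt dist (x * 2) = -1) = False := eq_false hA1
      simp only [h1T, if_false]
      rw [if_neg hP1]

-- one pop of A simulated by one call of Source B's walk, chain recursion included
theorem walk_sim (k : Int) : ∀ (fuel : Nat) (dist : Array Int) (seen : Array Bool)
    (x : Int) (f b : List Int) (nxt : Array Int) (d : Int),
    dist.size = 100001 → seen.size = 100001 → 0 ≤ d →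
    RMem dist seen → 0 ≤ x → x < 100001 → pyAt dist x = d →
    RLev dist f d → RLev dist nxt.toList (d + 1) → b.reverse = nxt.toList →
    (match walkB k fuel seen x nxt with
     | .timeout => bfsAux k fuel dist (x :: f) b = -1
     | .found => bfsAux k fuel dist (x :: f) b = d
     | .cont fuel' seen' nxt' => ∃ dist' b',
         bfsAux k fuel dist (x :: f) b = bfsAux k fuel' dist' f b' ∧
         dist'.size = 100001 ∧ seen'.size = 100001 ∧ RMem dist' seen' ∧ RLev dist' f d ∧
         RLev dist' nxt'.toList (d + 1) ∧ b'.reverse = nxt'.toList) := by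
  intro fuel
  induction fuel with
  | zero =>
    intro dist seen x f b nxt d _ _ _ _ _ _ _ _ _ _
    simp [walkB, bfsAux]
  | succ fuel ih =>
    intro dist seen x f b nxt d hsz hszB hd hmem hx0 hx1 hx hf hn hb
    rw [walkB_unfold]
    by_cases hxk : x = k
    · rw [if_pos hxk]
      show bfsAux k (fuel + 1) dist (x :: f) b = d
      simp only [bfsAux, bfsStep, if_pos hxk]
      rw [← hxk]
      exact hx
    · rw [if_neg hxk]
      obtain ⟨dist3, b2, hsz3, hszB3, hmem3, hf3, hl3, hb3, hhop, hstep⟩ :=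
        step_sim k dist seen x f b nxt d hsz hszB hd hmem hx0 hx1 hx hf hn hb hxk
      by_cases hP1 : hopC seen x
      · rw [if_pos hP1]
        have hA : bfsAux k (fuel + 1) dist (x :: f) b =
            bfsAux k fuel dist3 (2 * x :: f) b2 := by
          simp only [bfsAux]
          rw [hstep, if_pos hP1]
        rw [hA]
        obtain ⟨hg0, hg1, hg2⟩ := hhop hP1
        exact ih dist3 (seen3U seen x) (2 * x) f b2 (nxt2U seen nxt x) d hsz3 hszB3 hd
          hmem3 hg0 hg1 hg2 hf3 hl3 hb3
      · rw [if_neg hP1]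
        show ∃ dist' b', bfsAux k (fuel + 1) dist (x :: f) b = bfsAux k fuel dist' f b' ∧ _
        refine ⟨dist3, b2, ?_, hsz3, hszB3, hmem3, hf3, hl3, hb3⟩
        simp only [bfsAux]
        rw [hstep, if_neg hP1]

-- the outer loops agree, level by level (gas large enough never to run out before the fuel)
theorem loop_sim (k : Int) : ∀ (gas : Nat) (fuel : Nat) (dist : Array Int)
    (seen : Array Bool) (cur : List Int) (nxt : Array Int) (b : List Int) (d : Int),
    2 * fuel + (if cur.isEmpty then 2 else 1) ≤ gas →
    dist.size = 100001 → seen.size = 100001 → 0 ≤ d →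
    RMem dist seen → RLev dist cur d → RLev dist nxt.toList (d + 1) → b.reverse = nxt.toList →
    bfsAux k fuel dist cur b = bLoop k gas fuel seen cur nxt d := by
  intro gas
  induction gas with
  | zero =>
    intro fuel dist seen cur nxt b d hgas _ _ _ _ _ _ _
    split at hgas <;> omega
  | succ gas IH =>
    intro fuel dist seen cur nxt b d hgas hsz hszB hd hmem hcur hnxt hb
    cases cur with
    | cons x cur' =>
      obtain ⟨hx0, hx1, hx⟩ := hcur x List.mem_cons_self
      have hcur' : RLev dist cur' d := fun c hc => hcur c (List.mem_cons_of_mem _ hc)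
      have W := walk_sim k fuel dist seen x cur' b nxt d hsz hszB hd hmem hx0 hx1 hx
        hcur' hnxt hb
      show bfsAux k fuel dist (x :: cur') b =
        (match walkB k fuel seen x nxt with
         | .timeout => -1
         | .found => d
         | .cont fuel' seen' nxt' => bLoop k gas fuel' seen' cur' nxt' d)
      cases hw : walkB k fuel seen x nxt with
      | timeout => rw [hw] at W; exact W
      | found => rw [hw] at W; exact W
      | cont fuel' seen' nxt' =>
        rw [hw] at W
        obtain ⟨dist', b', heq, hsz', hszB', hmem', hf', hl', hb'⟩ := W
        rw [heq]
        have hlt := walkB_cont_lt k fuel seen x nxt fuel' seen' nxt' hw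
        refine IH fuel' dist' seen' cur' nxt' b' d ?_ hsz' hszB' hd hmem' hf' hl' hb'
        have h1 : 2 * fuel + 1 ≤ gas + 1 := by simpa using hgas
        have h2 : (if cur'.isEmpty then 2 else 1) ≤ 2 := by split <;> omega
        omega
    | nil =>
      cases hnl : nxt.toList with
      | nil =>
        have hbnil : b = [] := by
          have := congrArg List.reverse hb
          rw [hnl] at hb
          simpa using hb
        rw [hbnil, bfsAux_nil]
        show (-1 : Int) =
          (match nxt.toList with
           | [] => -1
           | y :: nxt0 => bLoop k gas fuel seen (y :: nxt0) #[] (d + 1))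
        rw [hnl]
      | cons y nxt0 =>
        rw [bfsAux_rotate, hb, hnl]
        show bfsAux k fuel dist (y :: nxt0) [] =
          (match nxt.toList with
           | [] => -1
           | y :: nxt0 => bLoop k gas fuel seen (y :: nxt0) #[] (d + 1))
        rw [hnl]
        have hnxt' : RLev dist (y :: nxt0) (d + 1) := by rw [← hnl]; exact hnxt
        refine IH fuel dist seen (y :: nxt0) #[] [] (d + 1) ?_ hsz hszB (by omega) hmem
          hnxt' (fun c hc => by cases hc) rfl
        have h1 : 2 * fuel + 2 ≤ gas + 1 := by simpa using hgas
        show 2 * fuel + (if (y :: nxt0).isEmpty then 2 else 1) ≤ gas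
        simp only [List.isEmpty_cons, Bool.false_eq_true, if_false]
        omega

-- ===== VERDICT (by name: the statement is the Claim_ definition above) =====
theorem bfs_spec : Claim_equal_bfs := by
  intro n k _ hpre
  obtain ⟨hn0, hn1⟩ := hpre
  unfold Spec_bfs bfs bfs_alt
  have hsz : (pySet (Array.replicate 100001 (-1)) n 0).size = 100001 := by
    rw [size_pySet, Array.size_replicate]
  have hszB : (pySetB (Array.replicate 100001 false) n).size = 100001 := by
    rw [size_pySetB, Array.size_replicate]
  apply loop_sim k 2000002 1000000 _ _ [n] #[] [] 0 (by norm_num) hsz hszB le_rfl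
  · intro v hv0 hv1
    rw [pyAt_pySet _ n v 0 (by rw [Array.size_replicate]) hn0 (by omega) hv0 hv1,
      pyAtB_pySetB _ n v (by rw [Array.size_replicate]) hn0 (by omega) hv0 hv1]
    have hrep : pyAt (Array.replicate 100001 (-1 : Int)) v = -1 := by
      have hv : v.toNat < 100001 := by omega
      simp [pyAt, Array.getD, hv]
    have hrepB : pyAtB (Array.replicate 100001 false) v = false := by
      have hv : v.toNat < 100001 := by omega
      simp [pyAtB, Array.getD, hv]
    by_cases he : v = n
    · rw [if_pos he, if_pos he]
      simp
    · rw [if_neg he, if_neg he, hrep, hrepB]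
      simp
  · intro c hc
    rcases List.mem_singleton.mp hc with rfl
    refine ⟨hn0, by omega, ?_⟩
    rw [pyAt_pySet _ c c 0 (by rw [Array.size_replicate]) hn0 (by omega) hn0 (by omega),
      if_pos rfl]
  · intro c hc
    cases hc
  · rfl
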